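-- pv_equiv track=rewrite | github.com/KhoiBui16/28Tech_Code_Online | Python/Source Code Python Contest/Contest_5_Mang1Chieu/Bai44_DayConChanLe.py | count_even_odd_subarrays
-- ===== SOURCE A (Python) =====
-- def count_even_odd_subarrays(n, a):
--     # Khởi tạo dictionary để đếm số lần xuất hiện của mỗi giá trị diff
--     prefix_counts = {0: 1}  # diff = 0 xuất hiện một lần ban đầu
--     count_even = count_odd = 0  # Biến đếm số lượng số chẵn và số lẻ
--     result = 0  # Biến đếm số lượng dãy con thỏa mãn điều kiện
--
--     for i in range(n):
--         if a[i] % 2 == 0: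
--             count_even += 1  # Tăng số lượng số chẵn nếu a[i] là số chẵn
--         else:
--             count_odd += 1  # Tăng số lượng số lẻ nếu a[i] là số lẻ
--
--         diff = count_even - count_odd  # Tính sự khác biệt giữa số chẵn và số lẻ
--
--         if diff in prefix_counts:
--             result += prefix_counts[diff]  # Thêm số lần xuất hiện của diff vào result
--             prefix_counts[diff] += 1  # Tăng giá trị của diff trong prefix_counts
--         else:
--             prefix_counts[diff] = 1  # Khởi tạo diff với giá trị 1 nếu chưa tồn tại
--
--     return result
-- ===== SOURCE B (Python) =====
-- def count_even_odd_subarrays(n, a):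
--     # Naive quadratic count: for each start index, rescan the suffix and
--     # count the positions where the even/odd balance returns to zero.
--     result = 0
--     for i in range(n):
--         balance = 0
--         for j in range(i, n):
--             balance += 1 if a[j] % 2 == 0 else -1
--             if balance == 0:
--                 result += 1
--     return result
-- ===== Notes on version B (the rewrite author's own statement) =====
-- stated objective: alternative
-- what changed: Replaces the single-pass prefix-balance hashmap count with a direct nested-loop scan that rescans every subarray and counts zero balances.
import Mathlib
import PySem

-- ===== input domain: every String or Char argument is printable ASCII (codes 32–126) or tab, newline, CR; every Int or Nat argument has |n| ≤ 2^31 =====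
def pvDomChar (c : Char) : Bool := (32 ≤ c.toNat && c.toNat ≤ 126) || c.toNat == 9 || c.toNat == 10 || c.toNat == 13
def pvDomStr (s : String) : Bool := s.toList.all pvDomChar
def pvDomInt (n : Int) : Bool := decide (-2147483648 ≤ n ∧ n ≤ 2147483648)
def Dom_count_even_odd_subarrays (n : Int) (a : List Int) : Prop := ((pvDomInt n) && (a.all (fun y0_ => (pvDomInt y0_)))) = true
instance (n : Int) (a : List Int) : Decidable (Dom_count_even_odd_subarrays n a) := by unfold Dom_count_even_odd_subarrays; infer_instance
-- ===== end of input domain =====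

-- B replaces A's one-pass prefix-balance hashmap count with a naive nested-loop scan that
-- rescans every subarray and counts zero balances (alternative algorithm, not faster).
-- ===== PORT A =====
-- loop body of A: classify a[i] as even/odd, then count/update the prefix-difference dict
def pvStepA (st : PySem.Dict Int Int × Int × Int × Int) (x : Int) :
    PySem.Dict Int Int × Int × Int × Int :=
  let pc := st.1
  let ce := st.2.1
  let co := st.2.2.1
  let res := st.2.2.2
  let ce' := if PySem.Int.mod x 2 = 0 then ce + 1 else ce
  let co' := if PySem.Int.mod x 2 = 0 then co else co + 1
  let diff := ce' - co'
  if pc.contains diff then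
    (pc.insert diff (pc.getD diff 0 + 1), ce', co', res + pc.getD diff 0)
  else
    (pc.insert diff 1, ce', co', res)

def count_even_odd_subarrays (n : Int) (a : List Int) : Int :=
  ((PySem.List.pyRange 0 n 1).foldl
    (fun st i => pvStepA st (PySem.List.pyGetD a i 0))
    ((PySem.Dict.empty).insert 0 1, 0, 0, 0)).2.2.2

-- ===== PORT B =====
-- inner-loop body of B: advance the running balance by ±1 and count the zeros
def pvStepB (s : Int × Int) (x : Int) : Int × Int :=
  let bal := s.1 + (if PySem.Int.mod x 2 = 0 then 1 else -1)
  (bal, if bal = 0 then s.2 + 1 else s.2)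

def count_even_odd_subarrays_alt (n : Int) (a : List Int) : Int :=
  (PySem.List.pyRange 0 n 1).foldl
    (fun res i =>
      ((PySem.List.pyRange i n 1).foldl
        (fun s j => pvStepB s (PySem.List.pyGetD a j 0)) (0, res)).2)
    0

-- ===== PRECONDITION & SPEC =====
-- Pre_ excludes n > len(a): there A (and B) raises IndexError at a[i].
def Pre_count_even_odd_subarrays (n : Int) (a : List Int) : Prop := n ≤ (a.length : Int)
instance (n : Int) (a : List Int) : Decidable (Pre_count_even_odd_subarrays n a) := by
  unfold Pre_count_even_odd_subarrays; infer_instance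

def pvWitness_count_even_odd_subarrays : Int × List Int := (4, [1, 2, 3, 4])

def Spec_count_even_odd_subarrays (n : Int) (a : List Int) (out : Int) : Prop := out = count_even_odd_subarrays_alt n a
instance (n : Int) (a : List Int) (out : Int) : Decidable (Spec_count_even_odd_subarrays n a out) := by unfold Spec_count_even_odd_subarrays; infer_instance

-- ===== CLAIM (what is proved, stated in full; the proofs are below) =====
def Claim_equal_count_even_odd_subarrays : Prop := ∀ (n : Int) (a : List Int), Dom_count_even_odd_subarrays n a → Pre_count_even_odd_subarrays n a → Spec_count_even_odd_subarrays n a (count_even_odd_subarrays n a)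

-- ===== LEMMAS AND PROOFS =====

def pvSg (x : Int) : Int := if PySem.Int.mod x 2 = 0 then 1 else -1

def pvCnt (v : Int) : List Int → Int
  | [] => 0
  | c :: p => (if c = v then 1 else 0) + pvCnt v p

def pvAt (prev : List Int) (b : Int) : List Int → Int
  | [] => 0
  | x :: t => pvCnt (b + pvSg x) (b :: prev) + pvAt (b :: prev) (b + pvSg x) t

def pvZ (b : Int) : List Int → Int
  | [] => 0
  | x :: t => (if b + pvSg x = 0 then 1 else 0) + pvZ (b + pvSg x) t

def pvBt : List Int → Int
  | [] => 0
  | x :: t => pvZ 0 (x :: t) + pvBt t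

def pvG (c : Int) : List Int → Int
  | [] => 0
  | x :: t => (if pvSg x = c then 1 else 0) + pvG (c - pvSg x) t

lemma pvSg_ne_zero (x : Int) : pvSg x ≠ 0 := by
  unfold pvSg; split <;> decide

lemma pvCnt_nonneg (v : Int) (l : List Int) : 0 ≤ pvCnt v l := by
  induction l with
  | nil => simp [pvCnt]
  | cons c p ih => simp only [pvCnt]; split <;> omega

lemma pvZ_eq_pvG (l : List Int) : ∀ b : Int, pvZ b l = pvG (-b) l := by
  induction l with
  | nil => intro b; rfl
  | cons x t ih =>
    intro b
    simp only [pvZ, pvG, ih (b + pvSg x)]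
    have h2 : -b - pvSg x = -(b + pvSg x) := by ring
    rw [h2]
    by_cases h : b + pvSg x = 0
    · have h' : pvSg x = -b := by omega
      simp [h']
    · have : ¬ (pvSg x = -b) := fun hc => h (by omega)
      simp [h, this]

lemma pvCnt_sum (prev : List Int) (v b : Int) :
    (prev.map (fun c => if pvSg v = c - b then (1:Int) else 0)).sum = pvCnt (b + pvSg v) prev := by
  induction prev with
  | nil => rfl
  | cons c p ih =>
    simp only [List.map_cons, List.sum_cons, pvCnt, ih]
    split_ifs with h1 h2 <;> omega

lemma pvMain (l : List Int) : ∀ (prev : List Int) (b : Int),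
    pvAt prev b l = pvBt l + (prev.map (fun c => pvG (c - b) l)).sum := by
  induction l with
  | nil =>
    intro prev b
    simp [pvAt, pvBt, pvG]
  | cons x t ih =>
    intro prev b
    have s0 := pvSg_ne_zero x
    simp only [pvAt, ih, List.map_cons, List.sum_cons, pvCnt]
    have hb : ¬ (b = b + pvSg x) := by omega
    have hbb : b - (b + pvSg x) = -pvSg x := by ring
    rw [hbb]
    have hBt : pvBt (x :: t) = pvG (-pvSg x) t + pvBt t := by
      simp only [pvBt, pvZ, pvZ_eq_pvG]
      have h0 : (0:Int) + pvSg x = pvSg x := by ring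
      rw [h0]
      have : ¬ (pvSg x = 0) := s0
      simp [this]
    rw [hBt]
    have hmap : (prev.map (fun c => pvG (c - b) (x :: t))).sum
        = pvCnt (b + pvSg x) prev + (prev.map (fun c => pvG (c - (b + pvSg x)) t)).sum := by
      have hstep : ∀ c : Int, pvG (c - b) (x :: t)
          = (if pvSg x = c - b then (1:Int) else 0) + pvG (c - (b + pvSg x)) t := by
        intro c
        simp only [pvG]
        have : c - b - pvSg x = c - (b + pvSg x) := by ring
        rw [this]
      calc (prev.map (fun c => pvG (c - b) (x :: t))).sum
          = (prev.map (fun c => (if pvSg x = c - b then (1:Int) else 0) + pvG (c - (b + pvSg x)) t)).sum := by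
            rw [List.map_congr_left (fun c _ => hstep c)]
        _ = (prev.map (fun c => if pvSg x = c - b then (1:Int) else 0)).sum
            + (prev.map (fun c => pvG (c - (b + pvSg x)) t)).sum :=
            PySem.List.sum_map_add_int prev _ _
        _ = pvCnt (b + pvSg x) prev + (prev.map (fun c => pvG (c - (b + pvSg x)) t)).sum := by
            rw [pvCnt_sum]
    rw [hmap]
    simp [hb]
    ring

lemma pvStepA_eq (d : PySem.Dict Int Int) (ce co res x : Int) :
    pvStepA (d, ce, co, res) x =
      (if d.contains (ce - co + pvSg x) then
        (d.insert (ce - co + pvSg x) (d.getD (ce - co + pvSg x) 0 + 1),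
         (if PySem.Int.mod x 2 = 0 then ce + 1 else ce),
         (if PySem.Int.mod x 2 = 0 then co else co + 1),
         res + d.getD (ce - co + pvSg x) 0)
      else
        (d.insert (ce - co + pvSg x) 1,
         (if PySem.Int.mod x 2 = 0 then ce + 1 else ce),
         (if PySem.Int.mod x 2 = 0 then co else co + 1),
         res)) := by
  unfold pvStepA pvSg
  by_cases hx : PySem.Int.mod x 2 = 0
  · simp only [hx, if_true]
    rw [show ce + 1 - co = ce - co + 1 from by ring]
  · simp only [hx, if_false]
    rw [show ce - (co + 1) = ce - co + -1 from by ring]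

lemma pvInvGetD_found (d : PySem.Dict Int Int) (prev : List Int) (b w : Int)
    (h1 : ∀ v, d.getD v 0 = pvCnt v (b :: prev)) :
    ∀ v, (d.insert w (d.getD w 0 + 1)).getD v 0 = pvCnt v (w :: b :: prev) := by
  intro v
  rw [PySem.Dict.getD_insert]
  show _ = (if w = v then 1 else 0) + pvCnt v (b :: prev)
  by_cases hv : v = w
  · subst hv
    rw [if_pos rfl, if_pos rfl, h1 v]
    ring
  · rw [if_neg hv, if_neg (fun h => hv h.symm), h1 v]
    ring

lemma pvInvContains_found (d : PySem.Dict Int Int) (prev : List Int) (b w u : Int)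
    (h2 : ∀ v, d.contains v = true ↔ pvCnt v (b :: prev) ≠ 0) :
    ∀ v, (d.insert w u).contains v = true ↔ pvCnt v (w :: b :: prev) ≠ 0 := by
  intro v
  rw [PySem.Dict.contains_insert]
  show _ ↔ (if w = v then 1 else 0) + pvCnt v (b :: prev) ≠ 0
  have hnn := pvCnt_nonneg v (b :: prev)
  by_cases hv : v = w
  · subst hv
    rw [if_pos rfl]
    simp only [beq_self_eq_true, Bool.true_or]
    constructor
    · intro _; omega
    · intro _; trivial
  · have hbeq : (v == w) = false := by simp [hv]
    rw [hbeq, Bool.false_or, if_neg (fun h => hv h.symm), h2 v]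
    omega

lemma pvInvGetD_new (d : PySem.Dict Int Int) (prev : List Int) (b w : Int)
    (h1 : ∀ v, d.getD v 0 = pvCnt v (b :: prev))
    (hz : pvCnt w (b :: prev) = 0) :
    ∀ v, (d.insert w 1).getD v 0 = pvCnt v (w :: b :: prev) := by
  intro v
  rw [PySem.Dict.getD_insert]
  show _ = (if w = v then 1 else 0) + pvCnt v (b :: prev)
  by_cases hv : v = w
  · subst hv
    rw [if_pos rfl, if_pos rfl, hz]
    ring
  · rw [if_neg hv, if_neg (fun h => hv h.symm), h1 v]
    ring

lemma pvInvContains_new (d : PySem.Dict Int Int) (prev : List Int) (b w : Int)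
    (h2 : ∀ v, d.contains v = true ↔ pvCnt v (b :: prev) ≠ 0) :
    ∀ v, (d.insert w 1).contains v = true ↔ pvCnt v (w :: b :: prev) ≠ 0 := by
  intro v
  rw [PySem.Dict.contains_insert]
  show _ ↔ (if w = v then 1 else 0) + pvCnt v (b :: prev) ≠ 0
  have hnn := pvCnt_nonneg v (b :: prev)
  by_cases hv : v = w
  · subst hv
    rw [if_pos rfl]
    simp only [beq_self_eq_true, Bool.true_or]
    constructor
    · intro _; omega
    · intro _; trivial
  · have hbeq : (v == w) = false := by simp [hv]
    rw [hbeq, Bool.false_or, if_neg (fun h => hv h.symm), h2 v]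
    omega

lemma pvAInv (l : List Int) : ∀ (prev : List Int) (d : PySem.Dict Int Int) (ce co res : Int),
    (∀ v, d.getD v 0 = pvCnt v ((ce - co) :: prev)) →
    (∀ v, d.contains v = true ↔ pvCnt v ((ce - co) :: prev) ≠ 0) →
    (l.foldl pvStepA (d, ce, co, res)).2.2.2 = res + pvAt prev (ce - co) l := by
  induction l with
  | nil => intro prev d ce co res h1 h2; simp [pvAt]
  | cons x t ih =>
    intro prev d ce co res h1 h2
    rw [List.foldl_cons, pvStepA_eq]
    have hAt : pvAt prev (ce - co) (x :: t)
        = pvCnt ((ce - co) + pvSg x) ((ce - co) :: prev)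
          + pvAt ((ce - co) :: prev) ((ce - co) + pvSg x) t := rfl
    have hdd : (if PySem.Int.mod x 2 = 0 then ce + 1 else ce)
        - (if PySem.Int.mod x 2 = 0 then co else co + 1) = ce - co + pvSg x := by
      unfold pvSg; split_ifs <;> ring
    by_cases hc : d.contains (ce - co + pvSg x) = true
    · rw [if_pos hc]
      have hres := ih ((ce - co) :: prev)
        (d.insert (ce - co + pvSg x) (d.getD (ce - co + pvSg x) 0 + 1))
        (if PySem.Int.mod x 2 = 0 then ce + 1 else ce)
        (if PySem.Int.mod x 2 = 0 then co else co + 1)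
        (res + d.getD (ce - co + pvSg x) 0)
        (by rw [hdd]; exact pvInvGetD_found d prev (ce - co) (ce - co + pvSg x) h1)
        (by rw [hdd]; exact pvInvContains_found d prev (ce - co) (ce - co + pvSg x) _ h2)
      rw [hres, hdd, hAt, h1 (ce - co + pvSg x)]
      ring
    · rw [if_neg hc]
      have hzero : pvCnt (ce - co + pvSg x) ((ce - co) :: prev) = 0 := by
        by_contra hz
        exact hc ((h2 (ce - co + pvSg x)).mpr hz)
      have hres := ih ((ce - co) :: prev)
        (d.insert (ce - co + pvSg x) 1)
        (if PySem.Int.mod x 2 = 0 then ce + 1 else ce)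
        (if PySem.Int.mod x 2 = 0 then co else co + 1)
        res
        (by rw [hdd]; exact pvInvGetD_new d prev (ce - co) (ce - co + pvSg x) h1 hzero)
        (by rw [hdd]; exact pvInvContains_new d prev (ce - co) (ce - co + pvSg x) h2)
      rw [hres, hdd, hAt, hzero]
      ring

lemma pvStepB_eq (s : Int × Int) (x : Int) :
    pvStepB s x = (s.1 + pvSg x, if s.1 + pvSg x = 0 then s.2 + 1 else s.2) := rfl

lemma pvZfold (l : List Int) : ∀ b res : Int,
    (l.foldl pvStepB (b, res)).2 = res + pvZ b l := by
  induction l with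
  | nil => intro b res; simp [pvZ]
  | cons x t ih =>
    intro b res
    rw [List.foldl_cons, pvStepB_eq]
    simp only []
    by_cases h : b + pvSg x = 0
    · rw [if_pos h, ih]
      simp only [pvZ, if_pos h]
      ring
    · rw [if_neg h, ih]
      simp only [pvZ, if_neg h]
      ring

lemma pvShift (a b : Int) (g : Int → Int → Int) (init : Int) :
    (PySem.List.pyRange (a + 1) (b + 1) 1).foldl g init
      = (PySem.List.pyRange a b 1).foldl (fun r i => g r (i + 1)) init := by
  rw [PySem.List.pyRange_one, PySem.List.pyRange_one,
    show b + 1 - (a + 1) = b - a from by ring, List.foldl_map, List.foldl_map]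
  apply PySem.List.foldl_congr_mem
  intro acc k _
  rw [show a + 1 + (k : Int) = a + (k : Int) + 1 from by ring]

lemma pvBOuter : ∀ (l : List Int) (res : Int),
    (PySem.List.pyRange 0 (l.length : Int) 1).foldl (fun r i => r + pvZ 0 (l.drop i.toNat)) res
      = res + pvBt l := by
  intro l
  induction l with
  | nil =>
    intro res
    rw [PySem.List.pyRange_one_eq_nil (by simp)]
    simp [pvBt]
  | cons x t ih =>
    intro res
    have hlen : (((x :: t).length : Nat) : Int) = (t.length : Int) + 1 := by push_cast [List.length_cons]; ring
    rw [hlen, PySem.List.pyRange_one_cons (by omega), List.foldl_cons]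
    rw [pvShift]
    have hcongr : (PySem.List.pyRange 0 (t.length : Int) 1).foldl
          (fun r i => (fun r i => r + pvZ 0 ((x :: t).drop i.toNat)) r (i + 1))
          (res + pvZ 0 ((x :: t).drop (0 : Int).toNat))
        = (PySem.List.pyRange 0 (t.length : Int) 1).foldl
          (fun r i => r + pvZ 0 (t.drop i.toNat))
          (res + pvZ 0 ((x :: t).drop (0 : Int).toNat)) := by
      apply PySem.List.foldl_congr_mem
      intro acc i hi
      have h0 : 0 ≤ i := ((PySem.List.mem_pyRange_one).mp hi).1
      have ht : (i + 1).toNat = i.toNat + 1 := by omega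
      simp only [ht, List.drop_succ_cons]
    rw [hcongr, ih]
    show res + pvZ 0 (x :: t) + pvBt t = res + pvBt (x :: t)
    simp only [pvBt]
    ring

lemma pvFinal (n : Int) (a : List Int) (hpre : n ≤ (a.length : Int)) :
    count_even_odd_subarrays n a = count_even_odd_subarrays_alt n a := by
  by_cases hn : n ≤ 0
  · unfold count_even_odd_subarrays count_even_odd_subarrays_alt
    rw [PySem.List.pyRange_one_eq_nil hn]
    rfl
  · rw [not_le] at hn
    set l := a.take n.toNat with hl
    have hlen : (l.length : Int) = n := by
      rw [hl, List.length_take]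
      omega
    have hget : ∀ i : Int, 0 ≤ i → i < n → PySem.List.pyGetD a i 0 = PySem.List.pyGetD l i 0 := by
      intro i h0 hiN
      have hia : i < (a.length : Int) := by omega
      have hil : i < (l.length : Int) := by omega
      rw [PySem.List.pyGetD_eq_getElem a 0 h0 hia, PySem.List.pyGetD_eq_getElem l 0 h0 hil]
      exact List.getElem_take.symm
    have hA : count_even_odd_subarrays n a = pvBt l := by
      unfold count_even_odd_subarrays
      have h1 : (PySem.List.pyRange 0 n 1).foldl
            (fun st i => pvStepA st (PySem.List.pyGetD a i 0))
            ((PySem.Dict.empty).insert 0 1, 0, 0, 0)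
          = (PySem.List.pyRange 0 n 1).foldl
            (fun st i => pvStepA st (PySem.List.pyGetD l i 0))
            ((PySem.Dict.empty).insert 0 1, 0, 0, 0) := by
        apply PySem.List.foldl_congr_mem
        intro acc i hi
        obtain ⟨hi0, hiN⟩ := (PySem.List.mem_pyRange_one).mp hi
        rw [hget i hi0 hiN]
      rw [h1, ← hlen, PySem.List.foldl_pyRange_zero_pyGetD' l 0 pvStepA
        ((PySem.Dict.empty).insert 0 1, 0, 0, 0)]
      rw [pvAInv l [] ((PySem.Dict.empty).insert 0 1) 0 0 0
        (by
          intro v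
          rw [PySem.Dict.getD_insert]
          show _ = (if 0 - 0 = v then 1 else 0) + 0
          by_cases hv : v = 0
          · subst hv; norm_num
          · rw [if_neg hv, if_neg (show ¬((0:Int) - 0 = v) from fun h => hv (by omega)),
              PySem.Dict.getD_empty]
            norm_num)
        (by
          intro v
          rw [PySem.Dict.contains_insert]
          show _ ↔ (if 0 - 0 = v then 1 else 0) + 0 ≠ 0
          by_cases hv : v = 0
          · subst hv
            norm_num
          · have hbeq : (v == (0:Int)) = false := by simp [hv]
            rw [hbeq, Bool.false_or, PySem.Dict.contains_empty,
              if_neg (show ¬((0:Int) - 0 = v) from fun h => hv (by omega))]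
            simp)]
      rw [show (0:Int) - 0 = 0 from by ring, pvMain l [] 0]
      simp
    have hB : count_even_odd_subarrays_alt n a = pvBt l := by
      unfold count_even_odd_subarrays_alt
      have h2 : (PySem.List.pyRange 0 n 1).foldl
            (fun res i =>
              ((PySem.List.pyRange i n 1).foldl
                (fun s j => pvStepB s (PySem.List.pyGetD a j 0)) (0, res)).2)
            0
          = (PySem.List.pyRange 0 n 1).foldl
            (fun res i => res + pvZ 0 (l.drop i.toNat))
            0 := by
        apply PySem.List.foldl_congr_mem
        intro res i hi
        obtain ⟨hi0, hiN⟩ := (PySem.List.mem_pyRange_one).mp hi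
        have h3 : (PySem.List.pyRange i n 1).foldl
              (fun s j => pvStepB s (PySem.List.pyGetD a j 0)) (0, res)
            = (PySem.List.pyRange i n 1).foldl
              (fun s j => pvStepB s (PySem.List.pyGetD l j 0)) (0, res) := by
          apply PySem.List.foldl_congr_mem
          intro acc j hj
          obtain ⟨hij, hjN⟩ := (PySem.List.mem_pyRange_one).mp hj
          rw [hget j (le_trans hi0 hij) hjN]
        rw [h3, ← hlen, PySem.List.foldl_pyRange_pyGetD' (a := i) l 0 pvStepB (0, res) hi0]
        rw [pvZfold]
      rw [h2, ← hlen, pvBOuter]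
      simp
    rw [hA, hB]

-- ===== VERDICT (by name: the statement is the Claim_ definition above) =====
theorem count_even_odd_subarrays_spec : Claim_equal_count_even_odd_subarrays := by
  intro n a _ hpre
  unfold Pre_count_even_odd_subarrays at hpre
  unfold Spec_count_even_odd_subarrays
  exact pvFinal n a hpre
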